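-- pv_equiv track=rewrite | github.com/muhammadjon-dev/leetcode | py_leetcode/calculate-money-in-leetcode-bank.py | totalMoney
-- ===== SOURCE A (Python) =====
-- def totalMoney(n: int) -> int:
--     money = [i for i in range(1,8)]
--     total = 0
--     for i in range(1, n+1):
--         a = (i-1)//7
--         b = (i-1)%7
--         total += money[b]+a*1
--     return total
-- ===== SOURCE B (Python) =====
-- def totalMoney(n: int) -> int:
--     if n <= 0:
--         return 0
--     w, r = divmod(n, 7)
--     return 28 * w + 7 * w * (w - 1) // 2 + r * (w + 1) + r * (r - 1) // 2
-- ===== Notes on version B (the rewrite author's own statement) =====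
-- stated objective: faster
-- what changed: Replaced A's day-by-day summation loop (list lookup per day) with a closed-form arithmetic-series formula over full weeks plus the partial week.
import Mathlib
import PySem

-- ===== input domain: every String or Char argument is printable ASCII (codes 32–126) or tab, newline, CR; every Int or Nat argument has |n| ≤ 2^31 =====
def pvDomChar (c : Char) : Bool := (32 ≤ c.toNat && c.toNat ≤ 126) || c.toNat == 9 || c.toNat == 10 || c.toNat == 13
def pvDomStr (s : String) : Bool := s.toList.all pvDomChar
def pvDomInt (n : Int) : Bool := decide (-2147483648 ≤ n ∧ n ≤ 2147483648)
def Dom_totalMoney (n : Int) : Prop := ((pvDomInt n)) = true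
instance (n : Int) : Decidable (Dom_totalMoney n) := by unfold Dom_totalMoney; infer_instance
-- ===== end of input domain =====

-- B replaces A's O(n) day-by-day loop with an O(1) closed-form arithmetic-series formula (full weeks + partial week).

-- ===== PORT A =====
-- money[b] with b = (i-1) % 7 is always in range 0..6, so pyGetD with default 0 is exact here.
def totalMoney (n : Int) : Int :=
  let money := PySem.List.pyRange 1 8 1
  (PySem.List.pyRange 1 (n+1) 1).foldl
    (fun total i =>
      let a := PySem.Int.floordiv (i-1) 7
      let b := PySem.Int.mod (i-1) 7
      total + (PySem.List.pyGetD money b 0 + a * 1)) 0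

-- ===== PORT B =====
def totalMoney_alt (n : Int) : Int :=
  if n ≤ 0 then 0
  else
    let w := PySem.Int.floordiv n 7
    let r := PySem.Int.mod n 7
    28 * w + PySem.Int.floordiv (7 * w * (w - 1)) 2 + r * (w + 1) + PySem.Int.floordiv (r * (r - 1)) 2

-- ===== PRECONDITION & SPEC =====
def Spec_totalMoney (n : Int) (out : Int) : Prop := out = totalMoney_alt n
instance (n : Int) (out : Int) : Decidable (Spec_totalMoney n out) := by unfold Spec_totalMoney; infer_instance

-- ===== CLAIM (what is proved, stated in full; the proofs are below) =====
def Claim_equal_totalMoney : Prop := ∀ (n : Int), Dom_totalMoney n → Spec_totalMoney n (totalMoney n)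

-- ===== LEMMAS AND PROOFS =====

theorem totalMoney_nonpos (n : Int) (h : n ≤ 0) : totalMoney n = 0 := by
  unfold totalMoney
  rw [show PySem.List.pyRange 1 (n+1) 1 = [] from PySem.List.pyRange_one_eq_nil (by omega)]
  rfl

theorem money_getD (b : Int) (hb : 0 ≤ b) (hb7 : b < 7) :
    PySem.List.pyGetD (PySem.List.pyRange 1 8 1) b 0 = b + 1 := by
  interval_cases b <;> decide

theorem totalMoney_succ (m : Nat) :
    totalMoney ((m : Int) + 1) = totalMoney (m : Int)
      + (PySem.Int.mod (m : Int) 7 + 1) + PySem.Int.floordiv (m : Int) 7 := by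
  unfold totalMoney
  rw [show ((m : Int) + 1 + 1) = ((m : Int) + 1) + 1 by ring,
      PySem.List.pyRange_one_succ_right (by omega), List.foldl_append]
  simp only [List.foldl]
  rw [show ((m : Int) + 1 - 1) = (m : Int) by ring,
      money_getD _ (PySem.Int.mod_nonneg _ (by omega)) (PySem.Int.mod_lt _ (by omega))]
  ring

theorem two_dvd_mul_pred (w : Int) : (2:Int) ∣ w * (w - 1) := by
  rcases Int.even_or_odd w with ⟨t, ht⟩ | ⟨t, ht⟩
  · exact ⟨t * (w - 1), by rw [ht]; ring⟩
  · exact ⟨w * t, by rw [ht]; ring⟩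

theorem half7 (w : Int) : 2 * (7 * w * (w - 1) / 2) = 7 * w * (w - 1) := by
  obtain ⟨t, ht⟩ := two_dvd_mul_pred w
  exact Int.mul_ediv_cancel' ⟨7 * t, by linear_combination 7 * ht⟩

theorem half1 (r : Int) : 2 * (r * (r - 1) / 2) = r * (r - 1) :=
  Int.mul_ediv_cancel' (two_dvd_mul_pred r)

theorem alt_succ (K : Int) (hK : 0 ≤ K) :
    totalMoney_alt (K + 1) = totalMoney_alt K
      + (PySem.Int.mod K 7 + 1) + PySem.Int.floordiv K 7 := by
  simp only [totalMoney_alt,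
             PySem.Int.floordiv_eq_ediv_of_pos (show (0:Int) < 7 by omega),
             PySem.Int.mod_eq_emod_of_pos (show (0:Int) < 7 by omega),
             PySem.Int.floordiv_eq_ediv_of_pos (show (0:Int) < 2 by omega)]
  rw [if_neg (show ¬ K + 1 ≤ 0 by omega)]
  by_cases h0 : K ≤ 0
  · have hK0 : K = 0 := le_antisymm h0 hK
    subst hK0; norm_num
  · rw [if_neg h0]
    obtain ⟨w, r, hK7, hr0, hr7⟩ : ∃ w r : Int, K = 7 * w + r ∧ 0 ≤ r ∧ r < 7 :=
      ⟨K / 7, K % 7, by omega, by omega, by omega⟩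
    have hw : K / 7 = w := by omega
    have hr : K % 7 = r := by omega
    by_cases h6 : r = 6
    · have hw1 : (K + 1) / 7 = w + 1 := by omega
      have hr1 : (K + 1) % 7 = 0 := by omega
      rw [hw1, hr1, hw, hr, h6]
      refine mul_left_cancel₀ (show (2:Int) ≠ 0 by norm_num) ?_
      linear_combination half7 (w + 1) - half7 w + half1 0 - half1 6
    · have hw1 : (K + 1) / 7 = w := by omega
      have hr1 : (K + 1) % 7 = r + 1 := by omega
      rw [hw1, hr1, hw, hr]
      refine mul_left_cancel₀ (show (2:Int) ≠ 0 by norm_num) ?_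
      linear_combination half1 (r + 1) - half1 r

theorem totalMoney_eq_alt_nat (m : Nat) : totalMoney (m : Int) = totalMoney_alt (m : Int) := by
  induction m with
  | zero => simp [totalMoney_nonpos 0 (by omega), totalMoney_alt]
  | succ k ih =>
    rw [show ((k + 1 : Nat) : Int) = (k : Int) + 1 by push_cast; ring,
        totalMoney_succ, alt_succ (k : Int) (by omega), ih]

-- ===== VERDICT (by name: the statement is the Claim_ definition above) =====
theorem totalMoney_spec : Claim_equal_totalMoney := by
  intro n _
  unfold Spec_totalMoney
  by_cases h : n ≤ 0
  · rw [totalMoney_nonpos n h]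
    unfold totalMoney_alt
    rw [if_pos h]
  · obtain ⟨m, rfl⟩ : ∃ m : Nat, n = (m : Int) := ⟨n.toNat, by omega⟩
    exact totalMoney_eq_alt_nat m
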